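-- pv_equiv track=rewrite | github.com/regro/regolith | src/regolith/tools.py | update_schemas
-- ===== SOURCE A (Python) =====
-- from copy import copy, deepcopy
--
-- def update_schemas(default_schema, user_schema):
--     """Merging the user schema into the default schema recursively and
--     return the merged schema. The default schema and user schema will
--     not be modified during the merging.
--
--     Parameters
--     ----------
--     default_schema : dict
--         The default schema.
--     user_schema : dict
--         The user defined schema.
--
--     Returns
--     -------
--     updated_schema : dict
--         The merged schema.
--     """
--     updated_schema = deepcopy(default_schema)
--     for key in user_schema.keys():
--         if (
--             (key in updated_schema)
--             and isinstance(updated_schema[key], dict)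
--             and isinstance(user_schema[key], dict)
--         ):
--             updated_schema[key] = update_schemas(updated_schema[key], user_schema[key])
--         else:
--             updated_schema[key] = user_schema[key]
--
--     return updated_schema
-- ===== SOURCE B (Python) =====
-- from copy import deepcopy
--
-- def update_schemas(default_schema, user_schema):
--     """Merge user_schema into a deep copy of default_schema using an
--     explicit worklist instead of call-stack recursion."""
--     updated = deepcopy(default_schema)
--     stack = [(updated, user_schema)]
--     while stack:
--         target, source = stack.pop()
--         for key in source.keys():
--             if (
--                 key in target
--                 and isinstance(target[key], dict)
--                 and isinstance(source[key], dict)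
--             ):
--                 stack.append((target[key], source[key]))
--             else:
--                 target[key] = source[key]
--     return updated
-- ===== Notes on version B (the rewrite author's own statement) =====
-- stated objective: alternative
-- what changed: Replaces A's call-stack recursion (which rebuilds merged sub-dicts and re-enters the function per nested level) with a single deepcopy followed by an explicit worklist of (target, source) pairs that mutates the copy in place; Pre_ excludes user association lists with duplicate top-level keys, which do not correspond to any Python dict input (B's stack pops duplicate pushes of the same key in reverse order there).
import Mathlib
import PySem

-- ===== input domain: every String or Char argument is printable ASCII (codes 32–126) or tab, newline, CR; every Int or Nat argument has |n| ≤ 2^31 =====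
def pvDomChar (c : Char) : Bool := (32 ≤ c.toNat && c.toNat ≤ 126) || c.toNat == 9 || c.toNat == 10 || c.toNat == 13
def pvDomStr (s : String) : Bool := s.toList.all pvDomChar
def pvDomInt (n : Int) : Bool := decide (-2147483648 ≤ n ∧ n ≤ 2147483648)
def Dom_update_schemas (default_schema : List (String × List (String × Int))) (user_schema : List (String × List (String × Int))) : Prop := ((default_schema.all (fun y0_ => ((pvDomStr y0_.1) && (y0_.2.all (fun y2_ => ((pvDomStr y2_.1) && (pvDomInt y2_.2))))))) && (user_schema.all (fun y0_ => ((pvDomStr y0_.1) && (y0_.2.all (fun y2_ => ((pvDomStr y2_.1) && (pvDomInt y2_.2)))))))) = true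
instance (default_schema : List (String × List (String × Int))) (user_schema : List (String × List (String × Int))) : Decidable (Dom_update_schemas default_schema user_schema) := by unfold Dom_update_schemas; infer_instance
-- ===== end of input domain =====

-- B replaces A's call-stack recursion by one deepcopy plus an explicit worklist of
-- (target, source) pairs mutated in place: a different decomposition, same cost.
-- (Both Pythons return a fresh dict; B mutates only its own deep copy, so the
-- observable side effects match A's. Equivalence here is about the return value.)

-- Python dict primitives on association lists, via PySem.Dict:
-- `target[k] = v` (overwrite in place, new keys append) and `target.get(k)` / `k in target`.
def pvIns {ν : Type} (l : List (String × ν)) (k : String) (v : ν) : List (String × ν) :=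
  ((PySem.Dict.mk l).insert k v).items

def pvGet? {ν : Type} (l : List (String × ν)) (k : String) : Option ν :=
  (PySem.Dict.mk l).get? k

-- ===== PORT A =====
-- A's recursive call at the inner level: inner values are ints, so the
-- `isinstance(..., dict)` tests are false and every key is simply overwritten.
def pvInnerMerge (t s : List (String × Int)) : List (String × Int) :=
  s.foldl (fun acc kv => pvIns acc kv.1 kv.2) t

def update_schemas (default_schema : List (String × List (String × Int))) (user_schema : List (String × List (String × Int))) : List (String × List (String × Int)) :=
  -- deepcopy(default_schema) is the value itself in a pure setting
  user_schema.foldl (fun acc kv =>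
    match pvGet? acc kv.1 with
    | some t => pvIns acc kv.1 (pvInnerMerge t kv.2)   -- key present, both values dicts: recurse
    | none   => pvIns acc kv.1 kv.2) default_schema

-- ===== PORT B =====
-- A worklist frame of Source B's stack: either the seeded top-level pair's source, or an
-- inner pair (key of the aliased target inside `updated`, inner source dict).
inductive PvFrame where
  | top : List (String × List (String × Int)) → PvFrame
  | inner : String → List (String × Int) → PvFrame
deriving Repr, DecidableEq

def pvWt : PvFrame → Nat
  | PvFrame.top s => s.length + 1
  | PvFrame.inner _ _ => 1

-- the for-loop of Source B over a top-level source: present keys push an inner frame,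
-- absent keys are written through
def pvPushStep (st : (List (String × List (String × Int))) × List PvFrame) (kv : String × List (String × Int)) : (List (String × List (String × Int))) × List PvFrame :=
  match pvGet? st.1 kv.1 with
  | some _ => (st.1, st.2 ++ [PvFrame.inner kv.1 kv.2])
  | none   => (pvIns st.1 kv.1 kv.2, st.2)

theorem pvPush_wt (src : List (String × List (String × Int))) (st : (List (String × List (String × Int))) × List PvFrame) :
    (((src.foldl pvPushStep st).2).map pvWt).sum ≤ ((st.2.map pvWt).sum) + src.length := by
  induction src generalizing st with
  | nil => simp
  | cons kv rest ih =>
    simp only [List.foldl_cons]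
    refine le_trans (ih _) ?_
    unfold pvPushStep
    cases pvGet? st.1 kv.1 <;> simp [pvWt] <;> omega

-- the while-loop of Source B: pop the last-pushed frame first
def pvLoop (upd : List (String × List (String × Int))) (stack : List PvFrame) : List (String × List (String × Int)) :=
  match stack with
  | [] => upd
  | PvFrame.inner k v :: rest =>
      -- inner values are ints: the isinstance test is false, so every key is written
      -- through the alias `target = updated[k]`; if k were absent the alias would be an
      -- orphan dict and `updated` would be unchanged (guard for totality, unreachable)
      let upd' := match pvGet? upd k with
        | some t => pvIns upd k (v.foldl (fun a kv => pvIns a kv.1 kv.2) t)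
        | none   => upd
      pvLoop upd' rest
  | PvFrame.top src :: rest =>
      let st := src.foldl pvPushStep (upd, [])
      pvLoop st.1 (st.2.reverse ++ rest)
termination_by (stack.map pvWt).sum
decreasing_by
  · simp [pvWt]
  · simp only [List.map_append, List.map_reverse, List.sum_append, List.map_cons, List.sum_cons,
      List.sum_reverse, pvWt]
    have h := pvPush_wt src (upd, [])
    simp only [List.foldl_attach]
    simp at h
    omega

def update_schemas_alt (default_schema : List (String × List (String × Int))) (user_schema : List (String × List (String × Int))) : List (String × List (String × Int)) :=
  pvLoop default_schema [PvFrame.top user_schema]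

-- ===== PRECONDITION & SPEC =====
-- Pre_ excludes user association lists with duplicate top-level keys: they do not
-- correspond to any Python dict input (dict keys are unique), and on them B's stack
-- pops the duplicate pushes of a key in reverse order.
def Pre_update_schemas (default_schema : List (String × List (String × Int))) (user_schema : List (String × List (String × Int))) : Prop :=
  (user_schema.map Prod.fst).Nodup

instance (default_schema : List (String × List (String × Int))) (user_schema : List (String × List (String × Int))) : Decidable (Pre_update_schemas default_schema user_schema) := by unfold Pre_update_schemas; infer_instance

def pvWitness_update_schemas : (List (String × List (String × Int))) × (List (String × List (String × Int))) :=
  ([("a", [("x", 1), ("y", 2)]), ("c", [])], [("a", [("x", 7), ("z", 3)]), ("b", [("w", 0)])])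

def Spec_update_schemas (default_schema : List (String × List (String × Int))) (user_schema : List (String × List (String × Int))) (out : List (String × List (String × Int))) : Prop := out = update_schemas_alt default_schema user_schema
instance (default_schema : List (String × List (String × Int))) (user_schema : List (String × List (String × Int))) (out : List (String × List (String × Int))) : Decidable (Spec_update_schemas default_schema user_schema out) := by unfold Spec_update_schemas; infer_instance

-- ===== CLAIM (what is proved, stated in full; the proofs are below) =====
def Claim_equal_update_schemas : Prop := ∀ (default_schema : List (String × List (String × Int))) (user_schema : List (String × List (String × Int))), Dom_update_schemas default_schema user_schema → Pre_update_schemas default_schema user_schema → Spec_update_schemas default_schema user_schema (update_schemas default_schema user_schema)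

-- ===== LEMMAS AND PROOFS =====

-- what the A-side fold does in one step, as a function on the accumulator
def pvApply (upd : List (String × List (String × Int))) (kv : String × List (String × Int)) : List (String × List (String × Int)) :=
  match pvGet? upd kv.1 with
  | some t => pvIns upd kv.1 (pvInnerMerge t kv.2)
  | none   => upd

-- the pair-level view of pvPushStep's frame list
def pvListStep (st : (List (String × List (String × Int))) × List (String × List (String × Int))) (kv : String × List (String × Int)) : (List (String × List (String × Int))) × List (String × List (String × Int)) :=
  match pvGet? st.1 kv.1 with
  | some _ => (st.1, st.2 ++ [kv])
  | none   => (pvIns st.1 kv.1 kv.2, st.2)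

def pvMkInner (kv : String × List (String × Int)) : PvFrame := PvFrame.inner kv.1 kv.2

theorem pvGet?_ins_of_ne {ν : Type} (l : List (String × ν)) (k k' : String) (v : ν) (h : k' ≠ k) :
    pvGet? (pvIns l k v) k' = pvGet? l k' := by
  simp [pvGet?, pvIns]
  exact PySem.Dict.get?_insert_of_ne _ _ h

theorem pvIns_comm {ν : Type} (l : List (String × ν)) (k k' : String) (v v' : ν) (t : ν)
    (hne : k ≠ k') (hk : pvGet? l k = some t) :
    pvIns (pvIns l k v) k' v' = pvIns (pvIns l k' v') k v := by
  have hc : (PySem.Dict.mk l).contains k = true := by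
    rw [PySem.Dict.contains_eq_isSome_get?]
    simp [pvGet?] at hk
    simp [hk]
  have hbkk' : (k == k') = false := by simp [hne]
  have hbk'k : (k' == k) = false := by simp [Ne.symm hne]
  simp only [pvIns]
  cases hc' : (PySem.Dict.mk l).contains k' with
  | true =>
    have hc2 : ((PySem.Dict.mk l).insert k v).contains k' = true := by
      rw [PySem.Dict.contains_insert]; simp [hc', hbk'k]
    have hc3 : ((PySem.Dict.mk l).insert k' v').contains k = true := by
      rw [PySem.Dict.contains_insert]; simp [hc]
    rw [PySem.Dict.items_insert_of_contains _ _ hc2,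
        PySem.Dict.items_insert_of_contains _ _ hc3,
        PySem.Dict.items_insert_of_contains _ _ hc,
        PySem.Dict.items_insert_of_contains _ _ hc']
    simp only [List.map_map]
    apply List.map_congr_left
    intro p _
    by_cases h1 : p.1 = k
    · simp [h1, hne]
    · by_cases h2 : p.1 = k'
      · simp [h2, Ne.symm hne]
      · simp [h1, h2]
  | false =>
    have hc2 : ((PySem.Dict.mk l).insert k v).contains k' = false := by
      rw [PySem.Dict.contains_insert]; simp [hc', hbk'k]
    have hc3 : ((PySem.Dict.mk l).insert k' v').contains k = true := by
      rw [PySem.Dict.contains_insert]; simp [hc]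
    rw [PySem.Dict.items_insert_of_not_contains _ _ hc2,
        PySem.Dict.items_insert_of_contains _ _ hc3,
        PySem.Dict.items_insert_of_contains _ _ hc,
        PySem.Dict.items_insert_of_not_contains _ _ hc']
    simp only [List.map_append]
    simp [Ne.symm hne]

-- the A-side fold never changes the binding of a key it does not touch
theorem pvGet?_A (u : List (String × List (String × Int))) (l : List (String × List (String × Int))) (k : String)
    (hk : k ∉ u.map Prod.fst) :
    pvGet? (update_schemas l u) k = pvGet? l k := by
  induction u generalizing l with
  | nil => simp [update_schemas]
  | cons kv rest ih =>
    simp only [List.map_cons, List.mem_cons, not_or] at hk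
    have hstep : update_schemas l (kv :: rest) = update_schemas (
        match pvGet? l kv.1 with
        | some t => pvIns l kv.1 (pvInnerMerge t kv.2)
        | none   => pvIns l kv.1 kv.2) rest := by
      simp only [update_schemas, List.foldl_cons]
    rw [hstep]
    cases h : pvGet? l kv.1 <;>
      rw [ih _ hk.2, pvGet?_ins_of_ne _ _ _ _ hk.1]

-- an in-place overwrite at a present key commutes with the A-side fold over other keys
theorem pvA_ins_comm (u : List (String × List (String × Int))) (l : List (String × List (String × Int)))
    (k : String) (M t : List (String × Int))
    (hk : pvGet? l k = some t) (hnm : k ∉ u.map Prod.fst) :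
    update_schemas (pvIns l k M) u = pvIns (update_schemas l u) k M := by
  induction u generalizing l t with
  | nil => simp [update_schemas]
  | cons kv rest ih =>
    simp only [List.map_cons, List.mem_cons, not_or] at hnm
    have hne : kv.1 ≠ k := fun h => hnm.1 h.symm
    have hg : pvGet? (pvIns l k M) kv.1 = pvGet? l kv.1 := pvGet?_ins_of_ne _ _ _ _ hne
    have hstep : ∀ (l' : List (String × List (String × Int))),
        update_schemas l' (kv :: rest) = update_schemas (
          match pvGet? l' kv.1 with
          | some t' => pvIns l' kv.1 (pvInnerMerge t' kv.2)
          | none    => pvIns l' kv.1 kv.2) rest := by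
      intro l'; simp only [update_schemas, List.foldl_cons]
    rw [hstep, hstep]
    cases h : pvGet? l kv.1 with
    | some t' =>
      simp only [hg, h]
      rw [pvIns_comm _ _ _ _ _ _ (Ne.symm hne) hk]
      exact ih _ _ (by rw [pvGet?_ins_of_ne _ _ _ _ (Ne.symm hne)]; exact hk) hnm.2
    | none =>
      simp only [hg, h]
      rw [pvIns_comm _ _ _ _ _ _ (Ne.symm hne) hk]
      exact ih _ _ (by rw [pvGet?_ins_of_ne _ _ _ _ (Ne.symm hne)]; exact hk) hnm.2

-- the inner-frame phase of pvLoop is the fold of pvApply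
theorem pvLoop_inners (ps : List (String × List (String × Int))) (upd : List (String × List (String × Int))) :
    pvLoop upd (ps.map pvMkInner) = ps.foldl pvApply upd := by
  induction ps generalizing upd with
  | nil => simp [pvLoop]
  | cons kv rest ih =>
    simp only [List.map_cons, pvMkInner]
    rw [pvLoop]
    simp only [List.foldl_cons]
    rw [ih]
    congr 1

-- pvPushStep is pvListStep with its frames viewed as pairs
theorem pvPush_eq_listStep (u : List (String × List (String × Int))) (l : List (String × List (String × Int))) (ps : List (String × List (String × Int))) :
    u.foldl pvPushStep (l, ps.map pvMkInner) =
      ((u.foldl pvListStep (l, ps)).1, (u.foldl pvListStep (l, ps)).2.map pvMkInner) := by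
  induction u generalizing l ps with
  | nil => simp
  | cons kv rest ih =>
    simp only [List.foldl_cons, pvPushStep, pvListStep]
    cases h : pvGet? l kv.1 with
    | some t =>
      simp only [h]
      have : ps.map pvMkInner ++ [PvFrame.inner kv.1 kv.2] = (ps ++ [kv]).map pvMkInner := by
        simp [pvMkInner]
      rw [this, ih]
    | none =>
      simp only [h]
      exact ih _ _

-- main invariant: running the push phase from (l, ps) and then the deferred inner
-- frames (popped in reverse push order) equals A's fold followed by the old frames
theorem pvMain (u : List (String × List (String × Int))) (l : List (String × List (String × Int))) (ps : List (String × List (String × Int)))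
    (hnd : (u.map Prod.fst).Nodup) :
    ((u.foldl pvListStep (l, ps)).2).reverse.foldl pvApply (u.foldl pvListStep (l, ps)).1 =
      ps.reverse.foldl pvApply (update_schemas l u) := by
  induction u generalizing l ps with
  | nil => simp [update_schemas]
  | cons kv rest ih =>
    simp only [List.map_cons, List.nodup_cons] at hnd
    have hstep : update_schemas l (kv :: rest) = update_schemas (
        match pvGet? l kv.1 with
        | some t => pvIns l kv.1 (pvInnerMerge t kv.2)
        | none   => pvIns l kv.1 kv.2) rest := by
      simp only [update_schemas, List.foldl_cons]
    simp only [List.foldl_cons, pvListStep]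
    cases h : pvGet? l kv.1 with
    | some t =>
      rw [ih _ _ hnd.2, hstep, h]
      rw [List.reverse_append]
      simp only [List.reverse_cons, List.reverse_nil, List.nil_append, List.foldl_cons,
        List.singleton_append]
      congr 1
      -- pvApply applied after the rest-fold equals folding from the merged binding
      have hget : pvGet? (update_schemas l rest) kv.1 = some t := by
        rw [pvGet?_A _ _ _ hnd.1]; exact h
      unfold pvApply
      rw [hget]
      exact (pvA_ins_comm rest l kv.1 (pvInnerMerge t kv.2) t h hnd.1).symm
    | none =>
      rw [ih _ _ hnd.2, hstep, h]

theorem update_schemas_alt_eq (d u : List (String × List (String × Int)))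
    (hnd : (u.map Prod.fst).Nodup) : update_schemas_alt d u = update_schemas d u := by
  unfold update_schemas_alt
  rw [pvLoop]
  have h0 : (d, ([] : List PvFrame)) = (d, ([] : List (String × List (String × Int))).map pvMkInner) := by simp
  rw [h0, pvPush_eq_listStep]
  simp only [List.append_nil, ← List.map_reverse]
  rw [pvLoop_inners]
  have := pvMain u d [] hnd
  simpa using this

-- ===== VERDICT (by name: the statement is the Claim_ definition above) =====
theorem update_schemas_spec : Claim_equal_update_schemas := by
  intro d u _ hpre
  unfold Spec_update_schemas
  exact (update_schemas_alt_eq d u hpre).symm
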